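-- pv_equiv track=rewrite | github.com/OvroAbir/Lucene-BugFix-Correlation | src/processing/matplot_utils.py | __get_grouped_datas_along_x_axis
-- ===== SOURCE A (Python) =====
-- def __get_grouped_datas_along_x_axis(xs, ys, interval_len):
-- 	interval_dic = {}
-- 	for i in range(len(xs)):
-- 		key = int(xs[i] / interval_len)
-- 		if key in interval_dic:
-- 			interval_dic[key].append(ys[i])
-- 		else:
-- 			interval_dic[key] = [ys[i]]
--
-- 	nxs = []
-- 	nys = []
-- 	for key in sorted(interval_dic):
-- 		interval_str = "{:04d}-{:04d}".format(key*interval_len, (key+1)*interval_len-1)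
-- 		for val in interval_dic[key]:
-- 			nxs.append(interval_str)
-- 			nys.append(val)
-- 	return nxs, nys
-- ===== SOURCE B (Python) =====
-- def __get_grouped_datas_along_x_axis(xs, ys, interval_len):
-- 	pairs = [(int(x / interval_len), y) for x, y in zip(xs, ys)]
-- 	nxs = []
-- 	nys = []
-- 	for key in sorted({k for k, _ in pairs}):
-- 		interval_str = "{:04d}-{:04d}".format(key * interval_len, (key + 1) * interval_len - 1)
-- 		for k, y in pairs:
-- 			if k == key:
-- 				nxs.append(interval_str)
-- 				nys.append(y)
-- 	return nxs, nys
-- ===== Notes on version B (the rewrite author's own statement) =====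
-- stated objective: alternative
-- what changed: Replaces the dict-of-lists accumulation with a sort of the distinct bucket keys followed by one filtering scan of the (key,y) pairs per distinct bucket, using no dictionary at all.
import Mathlib
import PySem

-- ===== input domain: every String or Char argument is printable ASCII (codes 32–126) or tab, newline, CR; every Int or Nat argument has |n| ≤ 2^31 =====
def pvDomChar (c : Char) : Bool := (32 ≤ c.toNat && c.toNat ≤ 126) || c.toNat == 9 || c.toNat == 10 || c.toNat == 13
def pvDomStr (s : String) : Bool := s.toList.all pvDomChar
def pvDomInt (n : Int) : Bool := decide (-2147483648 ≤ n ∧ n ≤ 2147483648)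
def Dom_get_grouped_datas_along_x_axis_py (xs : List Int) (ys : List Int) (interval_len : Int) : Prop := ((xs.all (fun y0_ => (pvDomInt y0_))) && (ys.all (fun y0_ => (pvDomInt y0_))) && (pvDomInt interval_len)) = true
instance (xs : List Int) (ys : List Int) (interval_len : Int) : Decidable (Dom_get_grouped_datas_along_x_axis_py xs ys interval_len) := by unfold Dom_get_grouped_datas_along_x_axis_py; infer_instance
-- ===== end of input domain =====

-- B replaces the dict-of-lists grouping with sorted distinct keys + one filtering scan per key (objective: alternative; same results).
-- ===== PORT A =====
-- "{:04d}-{:04d}".format(key*interval_len, (key+1)*interval_len-1)  — format(n,'04d') = str(n).zfill(4); used verbatim by both Pythons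
def pvIntervalStr (key interval_len : Int) : String :=
  PySem.Str.zfill (PySem.Int.toStr (key * interval_len)) 4 ++ "-" ++
    PySem.Str.zfill (PySem.Int.toStr ((key + 1) * interval_len - 1)) 4

def get_grouped_datas_along_x_axis_py (xs : List Int) (ys : List Int) (interval_len : Int) : List String × List Int :=
  let interval_dic : PySem.Dict Int (List Int) :=
    (PySem.List.pyRange 0 xs.length 1).foldl (fun d i =>
      let key := PySem.Int.truncdiv (PySem.List.pyGetD xs i 0) interval_len
      if d.contains key then d.insert key (d.getD key [] ++ [PySem.List.pyGetD ys i 0])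
      else d.insert key [PySem.List.pyGetD ys i 0]) PySem.Dict.empty
  (PySem.List.sorted interval_dic.keys (fun k => k) false).foldl (fun acc key =>
    let interval_str := pvIntervalStr key interval_len
    (interval_dic.getD key []).foldl (fun acc2 val => (acc2.1 ++ [interval_str], acc2.2 ++ [val])) acc)
    ([], [])

-- ===== PORT B =====
def get_grouped_datas_along_x_axis_py_alt (xs : List Int) (ys : List Int) (interval_len : Int) : List String × List Int :=
  let pairs := (xs.zip ys).map (fun p => (PySem.Int.truncdiv p.1 interval_len, p.2))
  (PySem.List.sorted (PySem.Set.ofList (pairs.map Prod.fst)) (fun k => k) false).foldl (fun acc key =>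
    let interval_str := pvIntervalStr key interval_len
    pairs.foldl (fun acc2 p =>
      if p.1 == key then (acc2.1 ++ [interval_str], acc2.2 ++ [p.2]) else acc2) acc)
    ([], [])

-- ===== PRECONDITION & SPEC =====
-- Pre_ excludes exactly the inputs where the Python A raises: ys shorter than xs (IndexError)
-- and interval_len = 0 with xs nonempty (ZeroDivisionError).
def Pre_get_grouped_datas_along_x_axis_py (xs : List Int) (ys : List Int) (interval_len : Int) : Prop :=
  xs.length ≤ ys.length ∧ (interval_len ≠ 0 ∨ xs = [])
instance (xs : List Int) (ys : List Int) (interval_len : Int) : Decidable (Pre_get_grouped_datas_along_x_axis_py xs ys interval_len) := by unfold Pre_get_grouped_datas_along_x_axis_py; infer_instance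
def pvWitness_get_grouped_datas_along_x_axis_py : List Int × List Int × Int := ([10, 25, -5], [7, 8, 9], 10)

def Spec_get_grouped_datas_along_x_axis_py (xs : List Int) (ys : List Int) (interval_len : Int) (out : List String × List Int) : Prop := out = get_grouped_datas_along_x_axis_py_alt xs ys interval_len
instance (xs : List Int) (ys : List Int) (interval_len : Int) (out : List String × List Int) : Decidable (Spec_get_grouped_datas_along_x_axis_py xs ys interval_len out) := by unfold Spec_get_grouped_datas_along_x_axis_py; infer_instance

-- ===== CLAIM (what is proved, stated in full; the proofs are below) =====
def Claim_equal_get_grouped_datas_along_x_axis_py : Prop := ∀ (xs : List Int) (ys : List Int) (interval_len : Int), Dom_get_grouped_datas_along_x_axis_py xs ys interval_len → Pre_get_grouped_datas_along_x_axis_py xs ys interval_len → Spec_get_grouped_datas_along_x_axis_py xs ys interval_len (get_grouped_datas_along_x_axis_py xs ys interval_len)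

-- ===== LEMMAS AND PROOFS =====

-- A's branching dict update is exactly Dict.modify (append to the key's list, default []).
theorem pvStepA_eq (d : PySem.Dict Int (List Int)) (k : Int) (y : Int) :
    (if d.contains k then d.insert k (d.getD k [] ++ [y]) else d.insert k [y])
      = d.modify k [] (fun cur => cur ++ [y]) := by
  by_cases h : d.contains k = true
  · simp [h, PySem.Dict.modify]
  · simp only [Bool.not_eq_true] at h
    simp [h, PySem.Dict.modify, PySem.Dict.getD_of_not_contains (h := h)]

-- Index iteration over range(len(xs)) reading xs[i], ys[i] is iteration over zip(xs, ys).
theorem pvRangeMapZip (xs ys : List Int) (h : xs.length ≤ ys.length) :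
    (PySem.List.pyRange 0 xs.length 1).map
        (fun i => (PySem.List.pyGetD xs i 0, PySem.List.pyGetD ys i 0)) = xs.zip ys := by
  rw [PySem.List.pyRange_one]
  simp only [sub_zero, Int.toNat_natCast, List.map_map]
  apply List.ext_getElem
  · simp [Nat.min_eq_left h]
  · intro k h1 h2
    simp only [List.length_map, List.length_range] at h1
    simp [PySem.List.pyGetD_natCast, List.getD_eq_getElem?_getD,
      List.getElem?_eq_getElem, h1, Nat.lt_of_lt_of_le h1 h]

-- A's index loop building the dict IS the modify-fold over the (key, y) pairs.
theorem pvDict_eq (xs ys : List Int) (il : Int) (h : xs.length ≤ ys.length) :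
    (PySem.List.pyRange 0 xs.length 1).foldl (fun d i =>
        if d.contains (PySem.Int.truncdiv (PySem.List.pyGetD xs i 0) il) then
          d.insert (PySem.Int.truncdiv (PySem.List.pyGetD xs i 0) il)
            (d.getD (PySem.Int.truncdiv (PySem.List.pyGetD xs i 0) il) [] ++ [PySem.List.pyGetD ys i 0])
        else d.insert (PySem.Int.truncdiv (PySem.List.pyGetD xs i 0) il) [PySem.List.pyGetD ys i 0])
      PySem.Dict.empty
      = ((xs.zip ys).map (fun p => (PySem.Int.truncdiv p.1 il, p.2))).foldl
          (fun d p => d.modify p.1 [] (fun cur => cur ++ [p.2])) PySem.Dict.empty := by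
  rw [← pvRangeMapZip xs ys h, List.foldl_map, List.foldl_map]
  apply PySem.List.foldl_congr_mem
  intro d i _
  exact pvStepA_eq d (PySem.Int.truncdiv (PySem.List.pyGetD xs i 0) il) (PySem.List.pyGetD ys i 0)

-- ===== VERDICT (by name: the statement is the Claim_ definition above) =====
theorem get_grouped_datas_along_x_axis_py_spec : Claim_equal_get_grouped_datas_along_x_axis_py := by
  intro xs ys il _ hpre
  obtain ⟨hlen, -⟩ := hpre
  unfold Spec_get_grouped_datas_along_x_axis_py
  simp only [get_grouped_datas_along_x_axis_py, get_grouped_datas_along_x_axis_py_alt]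
  rw [pvDict_eq xs ys il hlen]
  rw [PySem.Dict.keys_foldl_modify_key, PySem.Dict.keys_empty, PySem.Set.update_nil_left]
  simp only [PySem.Dict.getD_foldl_modify_append, PySem.Dict.getD_empty, List.nil_append]
  simp only [PySem.List.foldl_if_eq_foldl_filter, List.foldl_map, List.filter_map,
    Function.comp_def]
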